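-- pv_equiv track=rewrite | github.com/lunar-mycroft/Intro2AI | polyFit.py | regressMatrix
-- ===== SOURCE A (Python) =====
-- def sum2Power(data,power):
--     if power==0:
--         return len(data)
--     if power==1:
--         return sum(data)
--     return sum(map(lambda x:x**power,data))
--
-- def regressMatrix(data,degree):
--     result=[]
--     for i in range(0,degree+1):
--         row=[]
--         for j in range(0,degree+1):
--             row.append(sum2Power(data,i+j))
--         result.append(row)
--     return result
-- ===== SOURCE B (Python) =====
-- def regressMatrix(data, degree):
--     n = degree + 1
--     if n <= 0:
--         return []
--     # precompute sums[k] = sum of x**k over data, for k = 0 .. 2*degree, in one pass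
--     sums = [len(data)]
--     cur = [1] * len(data)
--     for _ in range(2 * degree):
--         cur = [c * x for c, x in zip(cur, data)]
--         sums.append(sum(cur))
--     return [[sums[i + j] for j in range(n)] for i in range(n)]
-- ===== Notes on version B (the rewrite author's own statement) =====
-- stated objective: faster
-- what changed: B precomputes the 2*degree+1 power-sums once by incremental multiplication and fills the matrix by indexing, instead of recomputing each power-sum from scratch for every (i,j) cell.
import Mathlib
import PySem

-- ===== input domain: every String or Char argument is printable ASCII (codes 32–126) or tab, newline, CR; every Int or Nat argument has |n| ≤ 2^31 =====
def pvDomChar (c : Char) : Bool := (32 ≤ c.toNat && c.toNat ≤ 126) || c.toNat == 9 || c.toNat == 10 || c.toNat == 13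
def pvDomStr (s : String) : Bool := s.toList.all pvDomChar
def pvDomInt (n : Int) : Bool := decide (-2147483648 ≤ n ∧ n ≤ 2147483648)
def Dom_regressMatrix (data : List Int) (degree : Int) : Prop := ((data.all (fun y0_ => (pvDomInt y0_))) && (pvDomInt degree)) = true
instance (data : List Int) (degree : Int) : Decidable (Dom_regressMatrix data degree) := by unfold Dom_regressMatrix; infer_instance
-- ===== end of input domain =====

-- B precomputes all power-sums once (incremental multiplication) and fills the matrix by
-- indexing, instead of A's recomputation of each power-sum per cell; intended as faster
-- (a timing run measured B many-fold faster at the sizes both finished, unconfirmed at the largest).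

-- ===== PORT A =====
def sum2Power (data : List Int) (power : Int) : Int :=
  if power = 0 then (data.length : Int)
  else if power = 1 then data.sum
  -- x ** power: A only calls this with power ≥ 0, where Int exponent = Nat exponent (toNat exact)
  else (data.map (fun x => x ^ power.toNat)).sum

def regressMatrix (data : List Int) (degree : Int) : List (List Int) :=
  (PySem.List.pyRange 0 (degree + 1) 1).foldl
    (fun result i =>
      result ++ [(PySem.List.pyRange 0 (degree + 1) 1).foldl
        (fun row j => row ++ [sum2Power data (i + j)]) []])
    []

-- ===== PORT B =====
-- one loop iteration of B: cur = [c*x for c,x in zip(cur,data)]; sums.append(sum(cur))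
def powStep (data : List Int) (st : List Int × List Int) : List Int × List Int :=
  let cur := (st.2.zip data).map (fun p => p.1 * p.2)
  (st.1 ++ [cur.sum], cur)

def regressMatrix_alt (data : List Int) (degree : Int) : List (List Int) :=
  let n := degree + 1
  if n ≤ 0 then []
  else
    let st := (PySem.List.pyRange 0 (2 * degree) 1).foldl
      (fun st _ => powStep data st)
      (([(data.length : Int)], data.map (fun _ => (1 : Int))) : List Int × List Int)
    let sums := st.1
    (PySem.List.pyRange 0 n 1).map (fun i =>
      (PySem.List.pyRange 0 n 1).map (fun j => PySem.List.pyGetD sums (i + j) 0))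

-- ===== PRECONDITION & SPEC =====
def Spec_regressMatrix (data : List Int) (degree : Int) (out : List (List Int)) : Prop := out = regressMatrix_alt data degree
instance (data : List Int) (degree : Int) (out : List (List Int)) : Decidable (Spec_regressMatrix data degree out) := by unfold Spec_regressMatrix; infer_instance

-- ===== CLAIM (what is proved, stated in full; the proofs are below) =====
def Claim_equal_regressMatrix : Prop := ∀ (data : List Int) (degree : Int), Dom_regressMatrix data degree → Spec_regressMatrix data degree (regressMatrix data degree)

-- ===== LEMMAS AND PROOFS =====

-- sum of x^k over data
def powSum (data : List Int) (k : Nat) : Int := (data.map (fun x => x ^ k)).sum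

theorem powSum_zero (data : List Int) : powSum data 0 = (data.length : Int) := by
  induction data with
  | nil => rfl
  | cons x xs ih => simp [powSum, List.map, List.sum_cons] at *; omega

theorem sum2Power_eq (data : List Int) (i : Int) (h : 0 ≤ i) :
    sum2Power data i = powSum data i.toNat := by
  unfold sum2Power
  split_ifs with h0 h1
  · subst h0; exact (powSum_zero data).symm
  · subst h1; simp [powSum]
  · rfl

theorem zip_mul_pow (data : List Int) (m : Nat) :
    ((data.map (fun x => x ^ m)).zip data).map (fun p => p.1 * p.2)
      = data.map (fun x => x ^ (m + 1)) := by
  induction data with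
  | nil => rfl
  | cons x xs ih => simp only [List.map_cons, List.zip_cons_cons, ih]; rw [pow_succ]

-- the state of B's loop after folding over range(0, t)
theorem powStep_foldl (data : List Int) (t : Nat) :
    (PySem.List.pyRange 0 t 1).foldl (fun st _ => powStep data st)
        (([(data.length : Int)], data.map (fun _ => (1 : Int))) : List Int × List Int)
      = ((List.range (t + 1)).map (powSum data), data.map (fun x => x ^ t)) := by
  induction t with
  | zero =>
      simp [List.range_succ, powSum_zero]
  | succ t ih =>
      have : (PySem.List.pyRange 0 (t + 1 : Nat) 1)
          = PySem.List.pyRange 0 t 1 ++ [(t : Int)] := by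
        have := PySem.List.pyRange_one_succ_right (a := 0) (b := (t : Int)) (by positivity)
        simpa using this
      rw [this, List.foldl_append, ih]
      simp only [List.foldl_cons, List.foldl_nil, powStep, zip_mul_pow]
      rw [List.range_succ (n := t + 1)]
      simp [powSum]

theorem regressMatrix_as_map (data : List Int) (degree : Int) :
    regressMatrix data degree
      = (PySem.List.pyRange 0 (degree + 1) 1).map (fun i =>
          (PySem.List.pyRange 0 (degree + 1) 1).map (fun j => sum2Power data (i + j))) := by
  unfold regressMatrix
  rw [PySem.List.foldl_append_singleton_eq_map]
  simp only [List.nil_append]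
  refine List.map_congr_left (fun i _ => ?_)
  rw [PySem.List.foldl_append_singleton_eq_map, List.nil_append]

theorem regressMatrix_spec' (data : List Int) (degree : Int) :
    regressMatrix data degree = regressMatrix_alt data degree := by
  unfold regressMatrix_alt
  by_cases hneg : degree + 1 ≤ 0
  · simp only [hneg, if_pos]
    rw [regressMatrix_as_map, PySem.List.pyRange_one_eq_nil (by omega)]
    rfl
  · simp only [hneg, if_false]
    rw [regressMatrix_as_map]
    have hd : 0 ≤ degree := by omega
    have h2d : (2 * degree) = ((2 * degree.toNat : Nat) : Int) := by omega
    rw [h2d, powStep_foldl]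
    refine List.map_congr_left (fun i hi => ?_)
    refine List.map_congr_left (fun j hj => ?_)
    rw [PySem.List.mem_pyRange_one] at hi hj
    have hij0 : 0 ≤ i + j := by omega
    have hlt : (i + j).toNat < 2 * degree.toNat + 1 := by omega
    rw [PySem.List.pyGetD_eq_getElem _ _ hij0 (by simpa using hlt)]
    rw [List.getElem_map, List.getElem_range]
    exact sum2Power_eq data (i + j) hij0

-- ===== VERDICT (by name: the statement is the Claim_ definition above) =====
theorem regressMatrix_spec : Claim_equal_regressMatrix := by
  intro data degree _
  unfold Spec_regressMatrix
  exact regressMatrix_spec' data degree
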